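-- pv_equiv track=rewrite | github.com/zZExx/ORB-SLAM3-Vehicle | ORB_SLAM3_ROS2/frame_revisit_eval.py | mask_to_segments
-- ===== SOURCE A (Python) =====
-- from typing import List, Optional, Sequence, Tuple
--
-- def mask_to_segments(mask: Sequence[bool]) -> List[Tuple[int, int]]:
--     segments: List[Tuple[int, int]] = []
--     start: Optional[int] = None
--     for idx, value in enumerate(mask):
--         if value and start is None:
--             start = idx
--         if (not value) and start is not None:
--             segments.append((start, idx - 1))
--             start = None
--     if start is not None:
--         segments.append((start, len(mask) - 1))
--     return segments
-- ===== SOURCE B (Python) =====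
-- from itertools import groupby
-- from typing import List, Sequence, Tuple
--
-- def mask_to_segments(mask: Sequence[bool]) -> List[Tuple[int, int]]:
--     segments: List[Tuple[int, int]] = []
--     offset = 0
--     for truthy, group in groupby(mask, key=bool):
--         length = sum(1 for _ in group)
--         if truthy:
--             segments.append((offset, offset + length - 1))
--         offset += length
--     return segments
-- ===== Notes on version B (the rewrite author's own statement) =====
-- stated objective: idiomatic
-- what changed: Replaces the per-element start-sentinel state machine with an itertools.groupby pass over maximal equal-truthiness runs, emitting one segment per True run from a running offset.
import Mathlib
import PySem

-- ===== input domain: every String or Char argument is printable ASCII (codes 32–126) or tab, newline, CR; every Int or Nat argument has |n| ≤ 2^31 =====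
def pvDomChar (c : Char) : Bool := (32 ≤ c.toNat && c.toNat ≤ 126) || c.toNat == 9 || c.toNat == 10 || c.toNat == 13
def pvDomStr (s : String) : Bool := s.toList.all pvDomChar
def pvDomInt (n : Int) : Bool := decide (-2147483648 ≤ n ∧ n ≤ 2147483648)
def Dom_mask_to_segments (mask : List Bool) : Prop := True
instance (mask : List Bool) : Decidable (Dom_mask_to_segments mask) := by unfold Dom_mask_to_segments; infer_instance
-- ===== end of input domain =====

-- B replaces A's per-element start-sentinel state machine with a groupby-style pass over
-- maximal runs of equal truthiness, emitting one segment per True run (objective: idiomatic).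

-- ===== PORT A =====
-- the for-loop over enumerate(mask), carrying (segments, start) and the running index
def maskLoopA : List Bool → Int → (List (Int × Int) × Option Int) → (List (Int × Int) × Option Int)
  | [], _, st => st
  | value :: rest, idx, (segments, start) =>
      let start := if value = true ∧ start = none then some idx else start
      let st' :=
        if value = false then
          match start with
          | some s => (segments ++ [(s, idx - 1)], none)
          | none => (segments, start)
        else (segments, start)
      maskLoopA rest (idx + 1) st'

def mask_to_segments (mask : List Bool) : List (Int × Int) :=
  let r := maskLoopA mask 0 ([], none)
  match r.2 with
  | some s => r.1 ++ [(s, (mask.length : Int) - 1)]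
  | none => r.1

-- ===== PORT B =====
-- groupby(mask, key=bool) as a list of (value, run-length) pairs of maximal equal runs
def maskRuns : List Bool → List (Bool × Nat)
  | [] => []
  | b :: rest =>
      (b, (rest.takeWhile (· == b)).length + 1) :: maskRuns (rest.dropWhile (· == b))
termination_by l => l.length
decreasing_by
  exact Nat.lt_succ_of_le (List.dropWhile_sublist (· == b)).length_le

def mask_to_segments_alt (mask : List Bool) : List (Int × Int) :=
  ((maskRuns mask).foldl
    (fun (acc : List (Int × Int) × Int) (r : Bool × Nat) =>
      ((if r.1 then acc.1 ++ [(acc.2, acc.2 + (r.2 : Int) - 1)] else acc.1), acc.2 + (r.2 : Int)))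
    ([], 0)).1

-- ===== PRECONDITION & SPEC =====
def Spec_mask_to_segments (mask : List Bool) (out : List (Int × Int)) : Prop := out = mask_to_segments_alt mask
instance (mask : List Bool) (out : List (Int × Int)) : Decidable (Spec_mask_to_segments mask out) := by unfold Spec_mask_to_segments; infer_instance

-- ===== CLAIM (what is proved, stated in full; the proofs are below) =====
def Claim_equal_mask_to_segments : Prop := ∀ (mask : List Bool), Dom_mask_to_segments mask → Spec_mask_to_segments mask (mask_to_segments mask)

-- ===== LEMMAS AND PROOFS =====

-- A's loop followed by the final flush, with the endpoint written relative to idx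
def maskFinA (l : List Bool) (idx : Int) (st : List (Int × Int) × Option Int) : List (Int × Int) :=
  match maskLoopA l idx st with
  | (segs, some s) => segs ++ [(s, idx + (l.length : Int) - 1)]
  | (segs, none) => segs

-- B's fold, with explicit start offset and accumulator
def foldRunsB (l : List Bool) (off : Int) (segs : List (Int × Int)) : List (Int × Int) :=
  ((maskRuns l).foldl
    (fun (acc : List (Int × Int) × Int) (r : Bool × Nat) =>
      ((if r.1 then acc.1 ++ [(acc.2, acc.2 + (r.2 : Int) - 1)] else acc.1), acc.2 + (r.2 : Int)))
    (segs, off)).1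

theorem maskFinA_eq (mask : List Bool) :
    mask_to_segments mask = maskFinA mask 0 ([], none) := by
  simp only [mask_to_segments, maskFinA]
  cases h : maskLoopA mask 0 ([], none) with
  | mk segs st =>
    cases st <;> simp

theorem finA_nil_none (idx : Int) (segs : List (Int × Int)) :
    maskFinA [] idx (segs, none) = segs := by simp [maskFinA, maskLoopA]

theorem finA_nil_some (idx s : Int) (segs : List (Int × Int)) :
    maskFinA [] idx (segs, some s) = segs ++ [(s, idx - 1)] := by
  simp [maskFinA, maskLoopA]

theorem finA_step (v : Bool) (t : List Bool) (idx : Int) (st st' : List (Int × Int) × Option Int)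
    (h : maskLoopA (v :: t) idx st = maskLoopA t (idx + 1) st') :
    maskFinA (v :: t) idx st = maskFinA t (idx + 1) st' := by
  simp only [maskFinA, h]
  cases hr : maskLoopA t (idx + 1) st' with
  | mk segs start =>
    cases start
    · simp
    · simp only [List.length_cons]
      have : idx + ((t.length : Int) + 1) - 1 = idx + 1 + (t.length : Int) - 1 := by ring
      simp [this]

theorem finA_cons_false_none (t : List Bool) (idx : Int) (segs : List (Int × Int)) :
    maskFinA (false :: t) idx (segs, none) = maskFinA t (idx + 1) (segs, none) := by
  apply finA_step; simp [maskLoopA]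

theorem finA_cons_true_none (t : List Bool) (idx : Int) (segs : List (Int × Int)) :
    maskFinA (true :: t) idx (segs, none) = maskFinA t (idx + 1) (segs, some idx) := by
  apply finA_step; simp [maskLoopA]

theorem finA_cons_true_some (t : List Bool) (idx s : Int) (segs : List (Int × Int)) :
    maskFinA (true :: t) idx (segs, some s) = maskFinA t (idx + 1) (segs, some s) := by
  apply finA_step; simp [maskLoopA]

theorem finA_cons_false_some (t : List Bool) (idx s : Int) (segs : List (Int × Int)) :
    maskFinA (false :: t) idx (segs, some s)
      = maskFinA t (idx + 1) (segs ++ [(s, idx - 1)], none) := by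
  apply finA_step; simp [maskLoopA]

theorem finA_skip_false (g : List Bool) (hg : ∀ b ∈ g, b = false) :
    ∀ (t : List Bool) (idx : Int) (segs : List (Int × Int)),
      maskFinA (g ++ t) idx (segs, none) = maskFinA t (idx + (g.length : Int)) (segs, none) := by
  induction g with
  | nil => intro t idx segs; simp
  | cons a g ih =>
    intro t idx segs
    have ha : a = false := hg a (List.mem_cons_self)
    subst ha
    rw [List.cons_append, finA_cons_false_none,
      ih (fun b hb => hg b (List.mem_cons_of_mem _ hb)) t (idx + 1) segs]
    congr 1
    simp only [List.length_cons]
    push_cast; ring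

theorem finA_skip_true (g : List Bool) (hg : ∀ b ∈ g, b = true) :
    ∀ (t : List Bool) (idx s : Int) (segs : List (Int × Int)),
      maskFinA (g ++ t) idx (segs, some s) = maskFinA t (idx + (g.length : Int)) (segs, some s) := by
  induction g with
  | nil => intro t idx s segs; simp
  | cons a g ih =>
    intro t idx s segs
    have ha : a = true := hg a (List.mem_cons_self)
    subst ha
    rw [List.cons_append, finA_cons_true_some,
      ih (fun b hb => hg b (List.mem_cons_of_mem _ hb)) t (idx + 1) s segs]
    congr 1
    simp only [List.length_cons]
    push_cast; ring

theorem foldRunsB_nil (off : Int) (segs : List (Int × Int)) :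
    foldRunsB [] off segs = segs := by
  have h : maskRuns [] = [] := by rw [maskRuns]
  simp [foldRunsB, h]

theorem foldRunsB_cons (b : Bool) (rest : List Bool) (off : Int) (segs : List (Int × Int)) :
    foldRunsB (b :: rest) off segs
      = foldRunsB (rest.dropWhile (· == b)) (off + ((rest.takeWhile (· == b)).length + 1 : Nat))
          (if b then segs ++ [(off, off + ((rest.takeWhile (· == b)).length + 1 : Nat) - 1)] else segs) := by
  have h : maskRuns (b :: rest)
      = (b, (rest.takeWhile (· == b)).length + 1) :: maskRuns (rest.dropWhile (· == b)) := by
    rw [maskRuns]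
  simp [foldRunsB, h]

theorem all_takeWhile_eq (b : Bool) (l : List Bool) :
    ∀ x ∈ l.takeWhile (· == b), x = b := by
  intro x hx
  simpa using List.mem_takeWhile_imp hx

theorem head_dropWhile_false (l : List Bool) (b' : Bool) (t' : List Bool)
    (h : l.dropWhile (· == true) = b' :: t') : b' = false := by
  have := List.head?_dropWhile_not (· == true) l
  rw [h] at this
  simpa using this

theorem main_none : ∀ (n : Nat) (l : List Bool), l.length ≤ n →
    ∀ (idx : Int) (segs : List (Int × Int)),
      maskFinA l idx (segs, none) = foldRunsB l idx segs := by
  intro n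
  induction n with
  | zero =>
    intro l hl idx segs
    have : l = [] := List.eq_nil_of_length_eq_zero (Nat.le_zero.mp hl)
    subst this
    rw [finA_nil_none, foldRunsB_nil]
  | succ n ih =>
    intro l hl idx segs
    match l with
    | [] => rw [finA_nil_none, foldRunsB_nil]
    | b :: rest =>
      have hsplit : rest.takeWhile (· == b) ++ rest.dropWhile (· == b) = rest :=
        List.takeWhile_append_dropWhile
      have hdlen : (rest.dropWhile (· == b)).length ≤ rest.length :=
        (List.dropWhile_sublist (· == b)).length_le
      have hrest : rest.length ≤ n := by
        have : (b :: rest).length = rest.length + 1 := by simp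
        omega
      rw [foldRunsB_cons]
      cases b with
      | false =>
        have e1 : maskFinA rest (idx + 1) (segs, none)
            = maskFinA (rest.dropWhile (· == false)) (idx + 1 + ((rest.takeWhile (· == false)).length : Int)) (segs, none) := by
          conv_lhs => rw [← hsplit]
          exact finA_skip_false _ (all_takeWhile_eq false rest) _ _ _
        rw [finA_cons_false_none, e1, ih _ (Nat.le_trans hdlen hrest)]
        simp only [if_neg (by simp : ¬ (false = true))]
        congr 1
        push_cast; ring
      | true =>
        have e1 : maskFinA rest (idx + 1) (segs, some idx)
            = maskFinA (rest.dropWhile (· == true)) (idx + 1 + ((rest.takeWhile (· == true)).length : Int)) (segs, some idx) := by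
          conv_lhs => rw [← hsplit]
          exact finA_skip_true _ (all_takeWhile_eq true rest) _ _ _ _
        rw [finA_cons_true_none, e1]
        match hr' : rest.dropWhile (· == true) with
        | [] =>
          rw [finA_nil_some, foldRunsB_nil]
          congr 3
          push_cast; ring
        | b' :: t' =>
          have hb' : b' = false := head_dropWhile_false rest b' t' hr'
          subst hb'
          rw [finA_cons_false_some]
          have hsplit2 : t'.takeWhile (· == false) ++ t'.dropWhile (· == false) = t' :=
            List.takeWhile_append_dropWhile
          have e2 : maskFinA t' (idx + 1 + ((rest.takeWhile (· == true)).length : Int) + 1)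
              (segs ++ [(idx, idx + 1 + ((rest.takeWhile (· == true)).length : Int) - 1)], none)
              = maskFinA (t'.dropWhile (· == false))
                  (idx + 1 + ((rest.takeWhile (· == true)).length : Int) + 1 + ((t'.takeWhile (· == false)).length : Int))
                  (segs ++ [(idx, idx + 1 + ((rest.takeWhile (· == true)).length : Int) - 1)], none) := by
            conv_lhs => rw [← hsplit2]
            exact finA_skip_false _ (all_takeWhile_eq false t') _ _ _
          have ht'len : (t'.dropWhile (· == false)).length ≤ n := by
            have h1 : (false :: t').length ≤ rest.length := by
              rw [← hr']; exact (List.dropWhile_sublist (· == true)).length_le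
            have h2 : (t'.dropWhile (· == false)).length ≤ t'.length :=
              (List.dropWhile_sublist _).length_le
            simp at h1
            omega
          rw [e2, ih _ ht'len, foldRunsB_cons]
          simp only [if_neg (by simp : ¬ (false = true))]
          congr 1
          · push_cast; ring
          · congr 2
            push_cast; ring

theorem maskA_eq_B (mask : List Bool) : mask_to_segments mask = mask_to_segments_alt mask := by
  rw [maskFinA_eq, main_none mask.length mask (Nat.le_refl _) 0 []]
  rfl

-- ===== VERDICT (by name: the statement is the Claim_ definition above) =====
theorem mask_to_segments_spec : Claim_equal_mask_to_segments := by
  intro mask _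
  unfold Spec_mask_to_segments
  exact maskA_eq_B mask
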